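-- pv_equiv track=rewrite | github.com/NathanMagnus/GoogleHomeExposureManager | custom_components/google_home_exposure_manager/helpers.py | group_entities_by_domain
-- ===== SOURCE A (Python) =====
-- def group_entities_by_domain(entity_ids: list[str]) -> dict[str, list[str]]:
--     """Group entity IDs by their domain.
--
--     Args:
--         entity_ids: List of entity IDs to group.
--
--     Returns:
--         Dictionary mapping domain names to lists of entity IDs.
--     """
--     grouped: dict[str, list[str]] = {}
--     for entity_id in entity_ids:
--         domain = entity_id.split(".")[0]
--         if domain not in grouped:
--             grouped[domain] = []
--         grouped[domain].append(entity_id)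
--     return grouped
-- ===== SOURCE B (Python) =====
-- def group_entities_by_domain(entity_ids: list[str]) -> dict[str, list[str]]:
--     """Group entity IDs by their domain (dedup domains, then one filter per domain)."""
--     domains = dict.fromkeys(e.split(".")[0] for e in entity_ids)
--     return {d: [e for e in entity_ids if e.split(".")[0] == d] for d in domains}
-- ===== Notes on version B (the rewrite author's own statement) =====
-- stated objective: alternative
-- what changed: B replaces A's single-pass dict-building loop (create-bucket-then-append per element) by a two-phase comprehension: first an ordered dedup of the domain keys via dict.fromkeys, then one filtering pass of the whole list per distinct domain.
import Mathlib
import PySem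

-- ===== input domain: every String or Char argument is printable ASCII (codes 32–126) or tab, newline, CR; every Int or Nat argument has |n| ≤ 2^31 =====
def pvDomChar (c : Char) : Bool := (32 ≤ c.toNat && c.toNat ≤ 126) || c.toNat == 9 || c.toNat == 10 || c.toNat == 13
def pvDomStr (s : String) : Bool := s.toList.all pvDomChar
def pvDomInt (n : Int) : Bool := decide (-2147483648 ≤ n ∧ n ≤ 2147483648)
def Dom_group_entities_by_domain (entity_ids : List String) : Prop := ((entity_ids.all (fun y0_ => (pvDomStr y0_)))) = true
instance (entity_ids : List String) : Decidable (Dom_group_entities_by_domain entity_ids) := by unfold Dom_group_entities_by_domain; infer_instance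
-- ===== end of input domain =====

-- B groups by an ordered dedup of domains followed by one filter per domain, instead of A's one-pass dict building; same value (alternative decomposition).

-- ===== PORT A =====
-- e.split(".")[0]: split? with a non-empty separator is always `some` of a non-empty list, so [0] is its head
def pvKeyOf (e : String) : String := ((PySem.Str.split? e ".").getD []).headD ""

-- body of A's for-loop (the local `domain = entity_id.split(".")[0]` is the pvKeyOf helper)
def pvStepA (grouped : PySem.Dict String (List String)) (entity_id : String) :
    PySem.Dict String (List String) :=
  (if grouped.contains (pvKeyOf entity_id) then grouped
   else grouped.insert (pvKeyOf entity_id) []).modify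
    (pvKeyOf entity_id) [] (fun l => l ++ [entity_id])

def group_entities_by_domain (entity_ids : List String) : List (String × List String) :=
  (entity_ids.foldl pvStepA PySem.Dict.empty).items

-- ===== PORT B =====
def group_entities_by_domain_alt (entity_ids : List String) : List (String × List String) :=
  (PySem.List.dedup (entity_ids.map pvKeyOf)).map
    (fun d => (d, entity_ids.filter (fun e => pvKeyOf e == d)))

-- ===== PRECONDITION & SPEC =====
def Spec_group_entities_by_domain (entity_ids : List String) (out : List (String × List String)) : Prop := out = group_entities_by_domain_alt entity_ids
instance (entity_ids : List String) (out : List (String × List String)) : Decidable (Spec_group_entities_by_domain entity_ids out) := by unfold Spec_group_entities_by_domain; infer_instance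

-- ===== CLAIM (what is proved, stated in full; the proofs are below) =====
def Claim_equal_group_entities_by_domain : Prop := ∀ (entity_ids : List String), Dom_group_entities_by_domain entity_ids → Spec_group_entities_by_domain entity_ids (group_entities_by_domain entity_ids)

-- ===== LEMMAS AND PROOFS =====

-- B's value for an arbitrary prefix (the fold invariant's right-hand side)
def pvGroupB (pre : List String) : List (String × List String) :=
  (PySem.List.dedup (pre.map pvKeyOf)).map
    (fun d => (d, pre.filter (fun e => pvKeyOf e == d)))

theorem pvDedup_append_singleton {α : Type} [BEq α] [LawfulBEq α] (l : List α) (x : α) :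
    PySem.List.dedup (l ++ [x]) =
      if x ∈ l then PySem.List.dedup l else PySem.List.dedup l ++ [x] := by
  have h : ∀ m : List α, PySem.List.dedup m = List.foldl PySem.Set.add [] m := by
    intro m; exact PySem.Set.ofList_eq_foldl m
  rw [h, h, List.foldl_append]
  simp only [List.foldl]
  rw [← h]
  unfold PySem.Set.add PySem.Set.contains
  by_cases hx : x ∈ l
  · simp [hx]
  · simp [hx]

theorem pvFind_map_key (ks : List String) (f : String → List String) (k : String)
    (hk : k ∈ ks) :
    List.find? (fun p => p.1 == k) (ks.map (fun j => (j, f j))) = some (k, f k) := by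
  induction ks with
  | nil => cases hk
  | cons j js ih =>
    simp only [List.map, List.find?]
    by_cases hj : j = k
    · subst hj; simp
    · have hb : (j == k) = false := by simp [hj]
      simp only [hb]
      rcases List.mem_cons.mp hk with h | h
      · exact absurd h.symm hj
      · exact ih h

theorem pvContains_of_items (d : PySem.Dict String (List String)) (ks : List String)
    (f : String → List String) (h : d.items = ks.map (fun j => (j, f j))) (k : String) :
    d.contains k = decide (k ∈ ks) := by
  show d.items.any (fun p => p.1 == k) = decide (k ∈ ks)
  rw [h, List.any_map]
  have hall : ∀ js : List String,
      js.any ((fun p : String × List String => p.1 == k) ∘ fun j => (j, f j)) =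
        decide (k ∈ js) := by
    intro js
    induction js with
    | nil => rfl
    | cons j js ih =>
      simp only [List.any_cons, ih, Function.comp_apply, List.mem_cons]
      by_cases hj : j = k
      · subst hj; simp
      · simp [hj, Ne.symm hj]
  exact hall ks

theorem pvGetD_of_items (d : PySem.Dict String (List String)) (ks : List String)
    (f : String → List String) (h : d.items = ks.map (fun j => (j, f j))) (k : String)
    (hk : k ∈ ks) : d.getD k [] = f k := by
  show ((Option.map (fun x => x.2) (List.find? (fun p => p.1 == k) d.items)).getD []) = f k
  rw [h, pvFind_map_key ks f k hk]
  rfl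

theorem pvStepA_items (pre : List String) (d : PySem.Dict String (List String)) (e : String)
    (h : d.items = pvGroupB pre) : (pvStepA d e).items = pvGroupB (pre ++ [e]) := by
  have hitems : d.items =
      (PySem.List.dedup (pre.map pvKeyOf)).map
        (fun j => (j, pre.filter (fun x => pvKeyOf x == j))) := h
  have hcont : d.contains (pvKeyOf e) =
      decide (pvKeyOf e ∈ PySem.List.dedup (pre.map pvKeyOf)) :=
    pvContains_of_items d _ _ hitems (pvKeyOf e)
  unfold pvStepA pvGroupB
  rw [List.map_append]
  simp only [List.map_cons, List.map_nil]
  rw [pvDedup_append_singleton]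
  by_cases hmem : pvKeyOf e ∈ pre.map pvKeyOf
  · -- existing domain: modify appends e to its bucket
    have hmd : pvKeyOf e ∈ PySem.List.dedup (pre.map pvKeyOf) :=
      (PySem.List.mem_dedup _ _).mpr hmem
    have hc : d.contains (pvKeyOf e) = true := by rw [hcont]; simpa using hmd
    have hget : d.getD (pvKeyOf e) [] = pre.filter (fun x => pvKeyOf x == pvKeyOf e) :=
      pvGetD_of_items d _ _ hitems (pvKeyOf e) hmd
    rw [if_pos hmem, if_pos hc]
    unfold PySem.Dict.modify
    rw [hget, PySem.Dict.items_insert_of_contains d _ hc, hitems, List.map_map]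
    apply List.map_congr_left
    intro j _
    by_cases hj : j = pvKeyOf e
    · subst hj
      simp [Function.comp, List.filter_append]
    · have h1 : (j == pvKeyOf e) = false := by simp [hj]
      have h2 : (pvKeyOf e == j) = false := by
        simp only [beq_eq_false_iff_ne]; exact fun hc => hj hc.symm
      simp [Function.comp, h1, h2, List.filter_append]
  · -- fresh domain: insert an empty bucket, then append e to it
    have hmd : pvKeyOf e ∉ PySem.List.dedup (pre.map pvKeyOf) :=
      fun hc => hmem ((PySem.List.mem_dedup _ _).mp hc)
    have hc : d.contains (pvKeyOf e) = false := by rw [hcont]; simpa using hmd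
    rw [if_neg hmem, if_neg (by simp [hc])]
    unfold PySem.Dict.modify
    have hi1 : (d.insert (pvKeyOf e) []).items = d.items ++ [(pvKeyOf e, [])] :=
      PySem.Dict.items_insert_of_not_contains d _ hc
    have hc1 : (d.insert (pvKeyOf e) []).contains (pvKeyOf e) = true := by
      show ((d.insert (pvKeyOf e) []).items.any fun p => p.1 == pvKeyOf e) = true
      rw [hi1]; simp
    have hg1 : (d.insert (pvKeyOf e) ([] : List String)).getD (pvKeyOf e) [] = [] :=
      PySem.Dict.getD_insert_self d (pvKeyOf e) [] []
    rw [hg1, PySem.Dict.items_insert_of_contains _ _ hc1, hi1, hitems,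
      List.map_append, List.map_map, List.map_append]
    have hfilter_pre : pre.filter (fun x => pvKeyOf x == pvKeyOf e) = [] := by
      rw [List.filter_eq_nil_iff]
      intro x hx hbeq
      exact hmem ((beq_iff_eq.mp hbeq) ▸ List.mem_map.mpr ⟨x, hx, rfl⟩)
    congr 1
    · apply List.map_congr_left
      intro j hj
      have hjdom : j ≠ pvKeyOf e :=
        fun he => hmem (he ▸ (PySem.List.mem_dedup _ _).mp hj)
      have h1 : (j == pvKeyOf e) = false := by simp [hjdom]
      have h2 : (pvKeyOf e == j) = false := by
        simp only [beq_eq_false_iff_ne]; exact fun hc => hjdom hc.symm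
      simp [Function.comp, h1, h2, List.filter_append]
    · simp [List.filter_append, hfilter_pre]

theorem pvFold_items (xs : List String) :
    ∀ (pre : List String) (d : PySem.Dict String (List String)),
      d.items = pvGroupB pre → (xs.foldl pvStepA d).items = pvGroupB (pre ++ xs) := by
  induction xs with
  | nil => intro pre d h; simpa using h
  | cons e es ih =>
    intro pre d h
    simp only [List.foldl]
    have := ih (pre ++ [e]) (pvStepA d e) (pvStepA_items pre d e h)
    simpa [List.append_assoc] using this

-- ===== VERDICT (by name: the statement is the Claim_ definition above) =====
theorem group_entities_by_domain_spec : Claim_equal_group_entities_by_domain := by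
  intro entity_ids _
  show group_entities_by_domain entity_ids = group_entities_by_domain_alt entity_ids
  have h0 : (PySem.Dict.empty : PySem.Dict String (List String)).items = pvGroupB [] := rfl
  have := pvFold_items entity_ids [] PySem.Dict.empty h0
  simpa [group_entities_by_domain, group_entities_by_domain_alt, pvGroupB] using this
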